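-- pv_equiv track=rewrite | github.com/ModPunchtree/URCLBot | genericURCLOptimiser/genericURCLOptimiser.py | INCDEC
-- ===== SOURCE A (Python) =====
-- def INCDEC(code: list) -> list:
--     for i, j in enumerate(code):
--         if i == len(code) - 1:
--             break
--         if j.startswith("INC"):
--             target = j[4: j.find(",")]
--             fetch = j[j.find(",") + 1: ]
--             if code[i + 1].startswith("DEC"):
--                 target2 = code[i + 1][4: code[i + 1].find(",")]
--                 fetch2 = code[i + 1][code[i + 1].find(",") + 1: ]
--                 if target2 == fetch2 and target == target2:
--                     code[i] = "MOV " + target + ", " + fetch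
--                     code.pop(i + 1)
--                     return INCDEC(code)
--     return code
-- ===== SOURCE B (Python) =====
-- def INCDEC(code: list) -> list:
--     # Single forward pass: merge each INC x,f / DEC x,x pair into MOV x,f; no restart after a merge.
--     # Mutates `code` in place to its result, like A (A edits and pops in place).
--     out = []
--     i = 0
--     n = len(code)
--     while i < n:
--         if i + 1 < n:
--             j = code[i]
--             nxt = code[i + 1]
--             if j.startswith("INC") and nxt.startswith("DEC"):
--                 target = j[4: j.find(",")]
--                 fetch = j[j.find(",") + 1:]
--                 target2 = nxt[4: nxt.find(",")]
--                 fetch2 = nxt[nxt.find(",") + 1:]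
--                 if target2 == fetch2 and target == target2:
--                     out.append("MOV " + target + ", " + fetch)
--                     i += 2
--                     continue
--         out.append(code[i])
--         i += 1
--     code[:] = out
--     return code
-- ===== Notes on version B (the rewrite author's own statement) =====
-- stated objective: alternative
-- what changed: Replaces A's restart-from-scratch recursion (rescan the whole list after every merge) with a single forward pass that emits the merged MOV and continues, since a freshly emitted MOV can never take part in a later INC/DEC merge.
import Mathlib
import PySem

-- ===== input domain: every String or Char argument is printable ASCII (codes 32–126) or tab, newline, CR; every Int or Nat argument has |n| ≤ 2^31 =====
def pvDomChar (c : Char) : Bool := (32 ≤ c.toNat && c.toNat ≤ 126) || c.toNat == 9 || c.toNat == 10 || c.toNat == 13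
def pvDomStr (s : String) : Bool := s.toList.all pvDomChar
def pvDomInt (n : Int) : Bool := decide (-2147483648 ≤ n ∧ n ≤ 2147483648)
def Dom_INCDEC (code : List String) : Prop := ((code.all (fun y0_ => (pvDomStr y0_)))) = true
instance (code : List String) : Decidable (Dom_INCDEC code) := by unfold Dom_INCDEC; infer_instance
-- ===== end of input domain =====

-- B replaces A's restart-after-every-merge rescan with a single forward pass (a merged MOV can
-- never take part in a later merge); equivalence is about the RETURN value (A also mutates its
-- argument in place; Source B mirrors that with code[:] = out).


-- ===== PORT A =====
-- A's inner `for i, j in enumerate(code)` loop, as structural recursion over the list: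
-- it walks adjacent pairs (j = code[i], y = code[i+1]; the `break` at the last element is the
-- [_] case), and at the FIRST merge point returns the edited list
-- (code[i] = "MOV " + target + ", " + fetch; code.pop(i+1)); `none` = the loop fell through.
def pvScanA : List (List Char) → Option (List (List Char))
  | [] => none
  | [_] => none
  | j :: y :: rest =>
    if PySem.Chars.startswith j ['I', 'N', 'C'] then
      let target := PySem.List.slice j (some 4) (some (PySem.Chars.find j [',']))
      let fetch := PySem.List.slice j (some (PySem.Chars.find j [','] + 1)) none
      if PySem.Chars.startswith y ['D', 'E', 'C'] then
        let target2 := PySem.List.slice y (some 4) (some (PySem.Chars.find y [',']))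
        let fetch2 := PySem.List.slice y (some (PySem.Chars.find y [','] + 1)) none
        if target2 = fetch2 ∧ target = target2 then
          some ((['M', 'O', 'V', ' '] ++ target ++ [',', ' '] ++ fetch) :: rest)
        else (pvScanA (y :: rest)).map (j :: ·)
      else (pvScanA (y :: rest)).map (j :: ·)
    else (pvScanA (y :: rest)).map (j :: ·)

-- needed for pvRunA's termination: the edit pops one element
theorem pvScanA_length {l c : List (List Char)} (h : pvScanA l = some c) :
    c.length + 1 = l.length := by
  induction l generalizing c with
  | nil => simp [pvScanA] at h
  | cons j t ih =>
    cases t with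
    | nil => simp [pvScanA] at h
    | cons y rest =>
      simp only [pvScanA] at h
      split_ifs at h
      all_goals first
        | (injection h with h'; subst h'; simp)
        | (rw [Option.map_eq_some_iff] at h; obtain ⟨c', hc', rfl⟩ := h;
           have := ih hc'; simp only [List.length_cons] at this ⊢; omega)

theorem pvScanA_lt {l c : List (List Char)} (h : pvScanA l = some c) :
    c.length < l.length := pvScanA_length h ▸ Nat.lt_succ_self c.length

-- A itself: run the scan; on an edit, recurse on the edited list (`return INCDEC(code)`),
-- otherwise return the list unchanged.
def pvRunA (code : List (List Char)) : List (List Char) :=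
  match h : pvScanA code with
  | none => code
  | some c => pvRunA c
termination_by code.length
decreasing_by exact pvScanA_lt h

def INCDEC (code : List String) : List String :=
  (pvRunA (code.map String.toList)).map String.ofList

-- ===== PORT B =====
-- Source B's merge test for one adjacent pair: `some` carries the merged MOV line.
def pvMergeB (x y : List Char) : Option (List Char) :=
  if PySem.Chars.startswith x ['I', 'N', 'C'] && PySem.Chars.startswith y ['D', 'E', 'C'] then
    let target := PySem.List.slice x (some 4) (some (PySem.Chars.find x [',']))
    let fetch := PySem.List.slice x (some (PySem.Chars.find x [','] + 1)) none
    let target2 := PySem.List.slice y (some 4) (some (PySem.Chars.find y [',']))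
    let fetch2 := PySem.List.slice y (some (PySem.Chars.find y [','] + 1)) none
    if target2 = fetch2 ∧ target = target2 then
      some (['M', 'O', 'V', ' '] ++ target ++ [',', ' '] ++ fetch)
    else none
  else none

-- Source B's single `while i < n` pass: merge and skip two, or copy one and advance.
def pvPassB : List (List Char) → List (List Char)
  | [] => []
  | [x] => [x]
  | x :: y :: rest =>
    match pvMergeB x y with
    | some m => m :: pvPassB rest
    | none => x :: pvPassB (y :: rest)

def INCDEC_alt (code : List String) : List String :=
  (pvPassB (code.map String.toList)).map String.ofList

-- ===== PRECONDITION & SPEC =====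
def Spec_INCDEC (code : List String) (out : List String) : Prop := out = INCDEC_alt code
instance (code : List String) (out : List String) : Decidable (Spec_INCDEC code out) := by unfold Spec_INCDEC; infer_instance

-- ===== CLAIM (what is proved, stated in full; the proofs are below) =====
def Claim_equal_INCDEC : Prop := ∀ (code : List String), Dom_INCDEC code → Spec_INCDEC code (INCDEC code)

-- ===== LEMMAS AND PROOFS =====

-- A's scan step, reformulated through B's pair test
theorem pvScanA_cons (j y : List Char) (rest : List (List Char)) :
    pvScanA (j :: y :: rest) =
      match pvMergeB j y with
      | some m => some (m :: rest)
      | none => (pvScanA (y :: rest)).map (j :: ·) := by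
  by_cases h1 : PySem.Chars.startswith j ['I', 'N', 'C'] = true
  · by_cases h2 : PySem.Chars.startswith y ['D', 'E', 'C'] = true
    · by_cases h3 : PySem.List.slice y (some 4) (some (PySem.Chars.find y [','])) =
          PySem.List.slice y (some (PySem.Chars.find y [','] + 1)) none ∧
          PySem.List.slice j (some 4) (some (PySem.Chars.find j [','])) =
          PySem.List.slice y (some 4) (some (PySem.Chars.find y [',']))
      · simp [pvScanA, pvMergeB, h1, h2, h3]
      · simp [pvScanA, pvMergeB, h1, h2, h3]
    · simp [pvScanA, pvMergeB, h1, h2]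
  · simp [pvScanA, pvMergeB, h1]

theorem pvMergeB_some_shape {x y m : List Char} (h : pvMergeB x y = some m) :
    ∃ s, m = 'M' :: 'O' :: 'V' :: ' ' :: s := by
  simp only [pvMergeB] at h
  split_ifs at h with h1 h2
  injection h with h'
  exact ⟨_, h'.symm⟩

theorem startswith_mov_INC (s : List Char) :
    PySem.Chars.startswith ('M' :: 'O' :: 'V' :: ' ' :: s) ['I', 'N', 'C'] = false := by
  rw [Bool.eq_false_iff]
  intro h
  rw [PySem.Chars.startswith_iff] at h
  simp [List.cons_prefix_cons] at h

theorem startswith_mov_DEC (s : List Char) :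
    PySem.Chars.startswith ('M' :: 'O' :: 'V' :: ' ' :: s) ['D', 'E', 'C'] = false := by
  rw [Bool.eq_false_iff]
  intro h
  rw [PySem.Chars.startswith_iff] at h
  simp [List.cons_prefix_cons] at h

theorem pvMergeB_mov_left {x y m : List Char} (h : pvMergeB x y = some m)
    (z : List Char) : pvMergeB m z = none := by
  obtain ⟨s, rfl⟩ := pvMergeB_some_shape h
  simp [pvMergeB, startswith_mov_INC]

theorem pvMergeB_mov_right {x y m : List Char} (h : pvMergeB x y = some m)
    (z : List Char) : pvMergeB z m = none := by
  obtain ⟨s, rfl⟩ := pvMergeB_some_shape h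
  simp [pvMergeB, startswith_mov_DEC]

-- the merged line never merges again: pvPassB just copies it
theorem pvPassB_mov_cons {x y m : List Char} (h : pvMergeB x y = some m)
    (rest : List (List Char)) : pvPassB (m :: rest) = m :: pvPassB rest := by
  cases rest with
  | nil => rfl
  | cons z rs => simp [pvPassB, pvMergeB_mov_left h]

-- shape of the scan result: its head is the old head or a merged MOV line
theorem pvScanA_some_head {y : List Char} {rest c : List (List Char)}
    (h : pvScanA (y :: rest) = some c) :
    ∃ hd tl, c = hd :: tl ∧ (hd = y ∨ ∃ x' y', pvMergeB x' y' = some hd) := by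
  cases rest with
  | nil => simp [pvScanA] at h
  | cons z rs =>
    rw [pvScanA_cons] at h
    cases hmm : pvMergeB y z with
    | some mv =>
      rw [hmm] at h
      injection h with h'
      exact ⟨mv, rs, h'.symm, Or.inr ⟨y, z, hmm⟩⟩
    | none =>
      rw [hmm, Option.map_eq_some_iff] at h
      obtain ⟨c', _, rfl⟩ := h
      exact ⟨y, c', rfl, Or.inl rfl⟩

-- if A's scan finds nothing, B's pass copies the list
theorem pvPassB_of_scanA_none {l : List (List Char)} (h : pvScanA l = none) :
    pvPassB l = l := by
  induction l using pvPassB.induct with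
  | case1 => rfl
  | case2 x => rfl
  | case3 x y rest m hm ih =>
    rw [pvScanA_cons, hm] at h
    cases h
  | case4 x y rest hm ih =>
    rw [pvScanA_cons, hm, Option.map_eq_none_iff] at h
    simp [pvPassB, hm, ih h]

-- one A-edit does not change B's answer
theorem pvPassB_of_scanA_some {l c : List (List Char)} (h : pvScanA l = some c) :
    pvPassB l = pvPassB c := by
  induction l using pvPassB.induct generalizing c with
  | case1 => simp [pvScanA] at h
  | case2 x => simp [pvScanA] at h
  | case3 x y rest m hm ih =>
    rw [pvScanA_cons, hm] at h
    injection h with h'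
    subst h'
    simp [pvPassB, hm, pvPassB_mov_cons hm]
  | case4 x y rest hm ih =>
    rw [pvScanA_cons, hm, Option.map_eq_some_iff] at h
    obtain ⟨c', hc', rfl⟩ := h
    obtain ⟨hd, tl, rfl, hhead⟩ := pvScanA_some_head hc'
    have hxh : pvMergeB x hd = none := by
      rcases hhead with rfl | ⟨x', y', hmm⟩
      · exact hm
      · exact pvMergeB_mov_right hmm x
    simp [pvPassB, hm, hxh, ih hc']

theorem pvRunA_eq_pvPassB (l : List (List Char)) : pvRunA l = pvPassB l := by
  induction l using pvRunA.induct with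
  | case1 l h =>
    rw [pvRunA.eq_def]
    split
    · exact (pvPassB_of_scanA_none h).symm
    · next c hs => rw [h] at hs; cases hs
  | case2 l c h ih =>
    rw [pvRunA.eq_def]
    split
    · next hs => rw [h] at hs; cases hs
    · next c' hs =>
      rw [h] at hs
      injection hs with hs'
      subst hs'
      rw [ih, pvPassB_of_scanA_some h]

-- ===== VERDICT (by name: the statement is the Claim_ definition above) =====
theorem INCDEC_spec : Claim_equal_INCDEC := by
  intro code _
  unfold Spec_INCDEC INCDEC INCDEC_alt
  rw [pvRunA_eq_pvPassB]
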